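-- pv_equiv track=rewrite | github.com/gupta98/DesktopAlarm | DFDs.py | checkMonth
-- ===== SOURCE A (Python) =====
-- def checkMonth(month: str):
--     try:
--         month = month.replace(" ", "")
--         month = month.rstrip(",")
--
--         first_split = month.split(",")
--         month_list = set()
--
--         for element in first_split:
--             if "-" in element:
--                 start, end = map(int, element.split("-"))
--                 start, end = min(start, end), max(start, end)
--                 if start > 0 and end < 13:
--                     for i in range(start, end + 1):
--                         month_list.add(i)
--                 else:
--                     return []
--
--             elif 0 < int(element) < 13:
--                 month_list.add(int(element))
--
--             else:
--                 return []
--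
--         return sorted(list(month_list))
--
--     except:
--         return []
-- ===== SOURCE B (Python) =====
-- def _parse(tok):
--     # One token -> a validated closed interval (lo, hi) of months, or None.
--     try:
--         if "-" in tok:
--             parts = tok.split("-")
--             if len(parts) != 2:
--                 return None
--             a, b = int(parts[0]), int(parts[1])
--             lo, hi = min(a, b), max(a, b)
--         else:
--             lo = hi = int(tok)
--     except ValueError:
--         return None
--     return (lo, hi) if 0 < lo and hi < 13 else None
--
--
-- def checkMonth(month: str):
--     # Staged: parse every token into an interval first; then answer each month
--     # 1..12 by an interval-coverage query. Ranges are never expanded and there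
--     # is no set, no accumulator and no sort.
--     toks = month.replace(" ", "").rstrip(",").split(",")
--     intervals = [_parse(t) for t in toks]
--     if None in intervals:
--         return []
--     return [m for m in range(1, 13) if any(lo <= m <= hi for lo, hi in intervals)]
-- ===== Notes on version B (the rewrite author's own statement) =====
-- stated objective: alternative
-- what changed: Replaces the single parse-validate-accumulate loop (set of expanded months, then sorted()) with two staged passes: every token is first parsed into a validated (lo,hi) interval, and the result is then produced by asking, for each month 1..12 in order, whether any interval covers it - ranges are never expanded and there is no set, no accumulator and no sort.
import Mathlib
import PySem

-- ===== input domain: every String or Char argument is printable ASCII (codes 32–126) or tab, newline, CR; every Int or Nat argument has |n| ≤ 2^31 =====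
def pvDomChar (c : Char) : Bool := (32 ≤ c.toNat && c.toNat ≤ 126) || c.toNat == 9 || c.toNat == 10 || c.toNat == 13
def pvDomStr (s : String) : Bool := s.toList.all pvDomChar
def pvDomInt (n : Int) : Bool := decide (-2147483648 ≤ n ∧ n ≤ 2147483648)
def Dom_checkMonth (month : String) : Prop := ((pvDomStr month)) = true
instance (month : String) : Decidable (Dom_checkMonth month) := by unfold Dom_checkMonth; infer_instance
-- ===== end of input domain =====

-- B is staged: parse every token into a validated (lo,hi) interval first, then produce the
-- result by an interval-coverage query for each month 1..12 — no set, no range expansion, no sort.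

-- shared tokenisation (identical source lines in A and B):
--   month.replace(" ", "").rstrip(",").split(",")
-- rstrip(",") is ported by hand (PySem has no per-char one-sided strip): drop trailing ','s — exact.
def pvTokens (month : String) : List (List Char) :=
  let m := PySem.Chars.replace month.toList [' '] []
  let m := (m.reverse.dropWhile (· == ',')).reverse
  PySem.Chars.splitOn m [',']

-- ===== PORT A =====
-- A's loop over the tokens; `none` = any path to `return []` (the explicit ones and every
-- exception swallowed by the bare `except`). `start, end = map(int, element.split("-"))`
-- succeeds iff the split has exactly 2 pieces and both parse with int(); that success is
-- tested with `.isSome` and the parsed value read back with `.getD 0` (exact under the guard).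
def checkMonthLoopA : List (List Char) → PySem.Set Int → Option (PySem.Set Int)
  | [], s => some s
  | e :: rest, s =>
    if PySem.Chars.isIn ['-'] e then
      if (PySem.Chars.splitOn e ['-']).length = 2 ∧
          (PySem.Int.ofChars? ((PySem.Chars.splitOn e ['-']).getD 0 [])).isSome = true ∧
          (PySem.Int.ofChars? ((PySem.Chars.splitOn e ['-']).getD 1 [])).isSome = true then
        -- start, end = min(start, end), max(start, end); if start > 0 and end < 13: add the range
        if 0 < min ((PySem.Int.ofChars? ((PySem.Chars.splitOn e ['-']).getD 0 [])).getD 0)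
                  ((PySem.Int.ofChars? ((PySem.Chars.splitOn e ['-']).getD 1 [])).getD 0) ∧
            max ((PySem.Int.ofChars? ((PySem.Chars.splitOn e ['-']).getD 0 [])).getD 0)
                ((PySem.Int.ofChars? ((PySem.Chars.splitOn e ['-']).getD 1 [])).getD 0) < 13 then
          checkMonthLoopA rest
            ((PySem.List.pyRange
                (min ((PySem.Int.ofChars? ((PySem.Chars.splitOn e ['-']).getD 0 [])).getD 0)
                     ((PySem.Int.ofChars? ((PySem.Chars.splitOn e ['-']).getD 1 [])).getD 0))
                (max ((PySem.Int.ofChars? ((PySem.Chars.splitOn e ['-']).getD 0 [])).getD 0)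
                     ((PySem.Int.ofChars? ((PySem.Chars.splitOn e ['-']).getD 1 [])).getD 0) + 1)
                1).foldl PySem.Set.add s)
        else none
      else none
    else
      -- elif 0 < int(element) < 13 (int() ValueError → except → none)
      if (PySem.Int.ofChars? e).isSome = true then
        if 0 < (PySem.Int.ofChars? e).getD 0 ∧ (PySem.Int.ofChars? e).getD 0 < 13 then
          checkMonthLoopA rest (PySem.Set.add s ((PySem.Int.ofChars? e).getD 0))
        else none
      else none

def checkMonth (month : String) : List Int :=
  match checkMonthLoopA (pvTokens month) PySem.Set.empty with
  | some s => PySem.List.sorted s (fun x => x) false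
  | none => []

-- ===== PORT B =====
-- Source B's _parse: one token -> a validated interval, or none; the try/except ValueError
-- around int() is the `match … | none` arm.
def pvParseTok (tok : List Char) : Option (Int × Int) :=
  let lohi : Option (Int × Int) :=
    if PySem.Chars.isIn ['-'] tok then
      if (PySem.Chars.splitOn tok ['-']).length ≠ 2 then none
      else
        match PySem.Int.ofChars? ((PySem.Chars.splitOn tok ['-']).getD 0 []),
              PySem.Int.ofChars? ((PySem.Chars.splitOn tok ['-']).getD 1 []) with
        | some a, some b => some (min a b, max a b)
        | _, _ => none
    else
      match PySem.Int.ofChars? tok with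
      | some v => some (v, v)
      | none => none
  match lohi with
  | some (lo, hi) => if 0 < lo ∧ hi < 13 then some (lo, hi) else none
  | none => none

-- Source B's body: intervals = [_parse(t) for t in toks]; if None in intervals: return [];
-- [m for m in range(1,13) if any(lo <= m <= hi ...)] (the `none` match arm is unreachable
-- after the membership check, like the unpack in the Python comprehension).
def checkMonth_alt (month : String) : List Int :=
  let intervals := (pvTokens month).map pvParseTok
  if none ∈ intervals then []
  else
    (PySem.List.pyRange 1 13 1).filter (fun m =>
      intervals.any (fun iv =>
        match iv with
        | some p => decide (p.1 ≤ m ∧ m ≤ p.2)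
        | none => false))

-- ===== PRECONDITION & SPEC =====
def Spec_checkMonth (month : String) (out : List Int) : Prop := out = checkMonth_alt month
instance (month : String) (out : List Int) : Decidable (Spec_checkMonth month out) := by unfold Spec_checkMonth; infer_instance

-- ===== CLAIM (what is proved, stated in full; the proofs are below) =====
def Claim_equal_checkMonth : Prop := ∀ (month : String), Dom_checkMonth month → Spec_checkMonth month (checkMonth month)

-- ===== LEMMAS AND PROOFS =====

-- the relation kept in step: A's set holds exactly the months covered by B's parsed
-- intervals, is duplicate-free, and every interval is validated (0 < lo, hi < 13)
def pvRel (s : PySem.Set Int) (ivs : List (Int × Int)) : Prop :=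
  s.Nodup ∧ (∀ p ∈ ivs, 0 < p.1 ∧ p.2 < 13) ∧
    ∀ x : Int, x ∈ s ↔ ∃ p ∈ ivs, p.1 ≤ x ∧ x ≤ p.2

theorem pvStepSingle (s : PySem.Set Int) (ivs : List (Int × Int)) (v : Int)
    (h : pvRel s ivs) (h1 : 0 < v) (h2 : v < 13) :
    pvRel (PySem.Set.add s v) (ivs ++ [(v, v)]) := by
  obtain ⟨hn, hv, hm⟩ := h
  refine ⟨PySem.Set.nodup_add s v hn, ?_, ?_⟩
  · intro p hp
    rcases List.mem_append.1 hp with hp | hp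
    · exact hv p hp
    · simp at hp; subst hp; exact ⟨h1, h2⟩
  · intro x
    rw [PySem.Set.mem_add, hm]
    constructor
    · rintro (⟨p, hp, hc⟩ | rfl)
      · exact ⟨p, List.mem_append.2 (Or.inl hp), hc⟩
      · exact ⟨(x, x), List.mem_append.2 (Or.inr (by simp)), le_refl x, le_refl x⟩
    · rintro ⟨p, hp, hc⟩
      rcases List.mem_append.1 hp with hp | hp
      · exact Or.inl ⟨p, hp, hc⟩
      · simp at hp; subst hp; simp at hc ⊢; omega

theorem pvStepRange (s : PySem.Set Int) (ivs : List (Int × Int)) (lo hi : Int)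
    (h : pvRel s ivs) (h1 : 0 < lo) (h2 : hi < 13) :
    pvRel (PySem.Set.update s (PySem.List.pyRange lo (hi + 1) 1)) (ivs ++ [(lo, hi)]) := by
  obtain ⟨hn, hv, hm⟩ := h
  refine ⟨PySem.Set.nodup_update s _ hn, ?_, ?_⟩
  · intro p hp
    rcases List.mem_append.1 hp with hp | hp
    · exact hv p hp
    · simp at hp; subst hp; exact ⟨h1, h2⟩
  · intro x
    rw [PySem.Set.mem_update, hm, PySem.List.mem_pyRange_one]
    constructor
    · rintro (⟨p, hp, hc⟩ | hr)
      · exact ⟨p, List.mem_append.2 (Or.inl hp), hc⟩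
      · exact ⟨(lo, hi), List.mem_append.2 (Or.inr (by simp)), by omega, by omega⟩
    · rintro ⟨p, hp, hc⟩
      rcases List.mem_append.1 hp with hp | hp
      · exact Or.inl ⟨p, hp, hc⟩
      · simp at hp; subst hp; simp at hc; omega

-- the A-loop fails exactly when some token parses to none, and on success its set is
-- related to all intervals accumulated so far plus the ones parsed from the tokens
theorem pvLoopRel (toks : List (List Char)) (s : PySem.Set Int) (ivs : List (Int × Int))
    (h : pvRel s ivs) :
    (checkMonthLoopA toks s = none ∧ none ∈ toks.map pvParseTok) ∨
      (∃ s', checkMonthLoopA toks s = some s' ∧ none ∉ toks.map pvParseTok ∧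
        pvRel s' (ivs ++ toks.filterMap pvParseTok)) := by
  induction toks generalizing s ivs with
  | nil => exact Or.inr ⟨s, rfl, by simp, by simpa using h⟩
  | cons e rest ih =>
    rw [checkMonthLoopA]
    by_cases hd : PySem.Chars.isIn ['-'] e = true
    · by_cases hlen : (PySem.Chars.splitOn e ['-']).length = 2
      · by_cases hp : (PySem.Int.ofChars? ((PySem.Chars.splitOn e ['-']).getD 0 [])).isSome = true
        · by_cases hq : (PySem.Int.ofChars? ((PySem.Chars.splitOn e ['-']).getD 1 [])).isSome = true
          · obtain ⟨a, ha⟩ := Option.isSome_iff_exists.1 hp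
            obtain ⟨b, hb⟩ := Option.isSome_iff_exists.1 hq
            have hpt : pvParseTok e = if 0 < min a b ∧ max a b < 13 then some (min a b, max a b) else none := by
              simp only [pvParseTok, hd, if_true, ha, hb]
              rw [if_neg (show ¬(PySem.Chars.splitOn e ['-']).length ≠ 2 by omega)]
            rw [if_pos hd, if_pos ⟨hlen, hp, hq⟩, ha, hb]
            simp only [Option.getD_some]
            by_cases hg : 0 < min a b ∧ max a b < 13
            · rw [if_pos hg]
              have hpt' : pvParseTok e = some (min a b, max a b) := by rw [hpt, if_pos hg]
              rcases ih _ (ivs ++ [(min a b, max a b)])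
                  (pvStepRange s ivs (min a b) (max a b) h hg.1 hg.2) with
                ⟨hA, hmem⟩ | ⟨s', hA, hnm, hrel⟩
              · exact Or.inl ⟨hA, by simp [hpt', hmem]⟩
              · refine Or.inr ⟨s', hA, by simp [hpt', hnm], ?_⟩
                simpa [hpt', List.append_assoc] using hrel
            · rw [if_neg hg]
              have hptn : pvParseTok e = none := by rw [hpt, if_neg hg]
              exact Or.inl ⟨rfl, by simp [hptn]⟩
          · rw [if_pos hd, if_neg (fun hc => hq hc.2.2)]
            have : pvParseTok e = none := by
              obtain ⟨a, ha⟩ := Option.isSome_iff_exists.1 hp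
              have hbq : PySem.Int.ofChars? ((PySem.Chars.splitOn e ['-']).getD 1 []) = none :=
                Option.not_isSome_iff_eq_none.1 hq
              simp only [pvParseTok, hd, if_true, ha, hbq]
              rw [if_neg (show ¬(PySem.Chars.splitOn e ['-']).length ≠ 2 by omega)]
            exact Or.inl ⟨rfl, by simp [this]⟩
        · rw [if_pos hd, if_neg (fun hc => hp hc.2.1)]
          have : pvParseTok e = none := by
            have hap : PySem.Int.ofChars? ((PySem.Chars.splitOn e ['-']).getD 0 []) = none :=
              Option.not_isSome_iff_eq_none.1 hp
            simp only [pvParseTok, hd, if_true, hap]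
            rw [if_neg (show ¬(PySem.Chars.splitOn e ['-']).length ≠ 2 by omega)]
          exact Or.inl ⟨rfl, by simp [this]⟩
      · rw [if_pos hd, if_neg (fun hc => hlen hc.1)]
        have : pvParseTok e = none := by simp [pvParseTok, hd, hlen]
        exact Or.inl ⟨rfl, by simp [this]⟩
    · rw [if_neg hd]
      by_cases hp : (PySem.Int.ofChars? e).isSome = true
      · obtain ⟨v, hv⟩ := Option.isSome_iff_exists.1 hp
        have hpt : pvParseTok e = if 0 < v ∧ v < 13 then some (v, v) else none := by
          simp [pvParseTok, hd, hv]
        rw [if_pos hp, hv]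
        simp only [Option.getD_some]
        by_cases hg : 0 < v ∧ v < 13
        · rw [if_pos hg]
          have hpt' : pvParseTok e = some (v, v) := by rw [hpt, if_pos hg]
          rcases ih _ (ivs ++ [(v, v)]) (pvStepSingle s ivs v h hg.1 hg.2) with
            ⟨hA, hmem⟩ | ⟨s', hA, hnm, hrel⟩
          · exact Or.inl ⟨hA, by simp [hpt', hmem]⟩
          · refine Or.inr ⟨s', hA, by simp [hpt', hnm], ?_⟩
            simpa [hpt', List.append_assoc] using hrel
        · rw [if_neg hg]
          have hptn : pvParseTok e = none := by rw [hpt, if_neg hg]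
          exact Or.inl ⟨rfl, by simp [hptn]⟩
      · rw [if_neg hp]
        have hap : PySem.Int.ofChars? e = none :=
          Option.not_isSome_iff_eq_none.1 hp
        have : pvParseTok e = none := by simp [pvParseTok, hd, hap]
        exact Or.inl ⟨rfl, by simp [this]⟩

-- B's any-over-options equals any over the underlying intervals once `none ∉ opts`
theorem pvAnyOpts (opts : List (Option (Int × Int))) (hn : none ∉ opts) (m : Int) :
    opts.any (fun iv =>
        match iv with
        | some p => decide (p.1 ≤ m ∧ m ≤ p.2)
        | none => false)
      = (opts.filterMap id).any (fun p => decide (p.1 ≤ m ∧ m ≤ p.2)) := by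
  induction opts with
  | nil => rfl
  | cons o rest ih =>
    cases o with
    | none => exact absurd (by simp) hn
    | some p => simp_all

-- on success, sorting A's set equals the interval-coverage scan over 1..12
theorem pvFinal (s : PySem.Set Int) (ivs : List (Int × Int)) (h : pvRel s ivs) :
    PySem.List.sorted s (fun x => x) false
      = (PySem.List.pyRange 1 13 1).filter (fun m => ivs.any (fun p => decide (p.1 ≤ m ∧ m ≤ p.2))) := by
  obtain ⟨hn, hv, hm⟩ := h
  have hpred : (PySem.List.pyRange 1 13 1).filter (fun m => ivs.any (fun p => decide (p.1 ≤ m ∧ m ≤ p.2)))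
      = (PySem.List.pyRange 1 13 1).filter (fun i => decide (i ∈ s)) := by
    apply List.filter_congr
    intro i _
    rw [Bool.eq_iff_iff, List.any_eq_true, decide_eq_true_eq]
    simp only [decide_eq_true_eq]
    exact (hm i).symm
  rw [hpred]
  apply PySem.List.sorted_eq_of_perm_of_pairwise_lt
  · rw [List.perm_ext_iff_of_nodup (List.Nodup.filter _ (by decide)) hn]
    intro a
    simp only [List.mem_filter, decide_eq_true_eq]
    constructor
    · exact fun ⟨_, h2⟩ => h2
    · intro ha
      obtain ⟨p, hp, h1, h2⟩ := (hm a).1 ha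
      have := hv p hp
      exact ⟨PySem.List.mem_pyRange_one.2 (by omega), ha⟩
  · exact List.Pairwise.filter _ (by decide)

-- ===== VERDICT (by name: the statement is the Claim_ definition above) =====
theorem checkMonth_spec : Claim_equal_checkMonth := by
  intro month _
  unfold Spec_checkMonth checkMonth checkMonth_alt
  have h0 : pvRel PySem.Set.empty [] := by
    refine ⟨?_, ?_, ?_⟩ <;> simp [PySem.Set.empty]
  rcases pvLoopRel (pvTokens month) PySem.Set.empty [] h0 with
    ⟨hA, hmem⟩ | ⟨s', hA, hnm, hrel⟩
  · rw [hA]; simp only [if_pos hmem]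
  · rw [hA]
    simp only [if_neg hnm]
    have hfm : ((pvTokens month).map pvParseTok).filterMap id
        = (pvTokens month).filterMap pvParseTok := by
      rw [List.filterMap_map]; rfl
    calc PySem.List.sorted s' (fun x => x) false
        = (PySem.List.pyRange 1 13 1).filter
            (fun m => ((pvTokens month).filterMap pvParseTok).any (fun p => decide (p.1 ≤ m ∧ m ≤ p.2))) :=
          pvFinal s' _ (by simpa using hrel)
      _ = _ := by
          apply List.filter_congr
          intro m _
          rw [← hfm, ← pvAnyOpts _ hnm m]
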